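-- pv_equiv track=rewrite | github.com/jcraig949jfi/Prometheus | cartography/shared/scripts/v2/algebraic_vs_operadic.py | signature_to_class
-- ===== SOURCE A (Python) =====
-- def signature_to_class(sig):
--     """
--     Map a structural operator signature to an operadic class label.
--
--     Classes are defined by which "tiers" of operators are present:
--       Tier 1 (core): Equal, For, And
--       Tier 2 (arithmetic): Add, Sub, Mul, Div, Pow, Neg, Sqrt
--       Tier 3 (analytic): Sum, Product, Integral, Limit, Derivative, ComplexDerivative
--       Tier 4 (combinatorial): Factorial, Binomial, Floor, Ceil
--       Tier 5 (relational): Less, LessEqual, Greater, GreaterEqual, NotEqual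
--       Tier 6 (set-theoretic): Set, Element, Exists, ForAll, Or, Not, Implies, Equivalent
--       Tier 7 (special): Zeros, Poles, Residues, Solutions, Image, Convergents, Def, Where, Abs
--     """
--     tiers = {
--         "core": {"Equal", "For", "And"},
--         "arith": {"Add", "Sub", "Mul", "Div", "Pow", "Neg", "Sqrt"},
--         "analytic": {"Sum", "Product", "Integral", "Limit", "Derivative", "ComplexDerivative"},
--         "combin": {"Factorial", "Binomial", "Floor", "Ceil"},
--         "relational": {"Less", "LessEqual", "Greater", "GreaterEqual", "NotEqual"},
--         "settheory": {"Set", "Element", "Exists", "ForAll", "Or", "Not", "Implies", "Equivalent"},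
--         "special": {"Zeros", "Poles", "Residues", "Solutions", "Image", "Convergents", "Def", "Where", "Abs"},
--     }
--     present = []
--     for tier_name, tier_ops in tiers.items():
--         if sig & tier_ops:
--             present.append(tier_name)
--     return "+".join(present) if present else "empty"
-- ===== SOURCE B (Python) =====
-- TIERS = [
--     ("core", ("Equal", "For", "And")),
--     ("arith", ("Add", "Sub", "Mul", "Div", "Pow", "Neg", "Sqrt")),
--     ("analytic", ("Sum", "Product", "Integral", "Limit", "Derivative", "ComplexDerivative")),
--     ("combin", ("Factorial", "Binomial", "Floor", "Ceil")),
--     ("relational", ("Less", "LessEqual", "Greater", "GreaterEqual", "NotEqual")),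
--     ("settheory", ("Set", "Element", "Exists", "ForAll", "Or", "Not", "Implies", "Equivalent")),
--     ("special", ("Zeros", "Poles", "Residues", "Solutions", "Image", "Convergents", "Def", "Where", "Abs")),
-- ]
-- OP_TO_TIER = {op: tier for tier, ops in TIERS for op in ops}
-- TIER_ORDER = [tier for tier, _ in TIERS]
--
--
-- def signature_to_class(sig):
--     present_tiers = {OP_TO_TIER[op] for op in sig if op in OP_TO_TIER}
--     present = [t for t in TIER_ORDER if t in present_tiers]
--     return "+".join(present) if present else "empty"
-- ===== Notes on version B (the rewrite author's own statement) =====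
-- stated objective: alternative
-- what changed: B inverts the data: instead of scanning each of the 7 tier sets for an intersection with sig, it precomputes an operator-to-tier index, traverses sig once collecting the set of present tiers, and filters a fixed tier-order list.
import Mathlib
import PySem

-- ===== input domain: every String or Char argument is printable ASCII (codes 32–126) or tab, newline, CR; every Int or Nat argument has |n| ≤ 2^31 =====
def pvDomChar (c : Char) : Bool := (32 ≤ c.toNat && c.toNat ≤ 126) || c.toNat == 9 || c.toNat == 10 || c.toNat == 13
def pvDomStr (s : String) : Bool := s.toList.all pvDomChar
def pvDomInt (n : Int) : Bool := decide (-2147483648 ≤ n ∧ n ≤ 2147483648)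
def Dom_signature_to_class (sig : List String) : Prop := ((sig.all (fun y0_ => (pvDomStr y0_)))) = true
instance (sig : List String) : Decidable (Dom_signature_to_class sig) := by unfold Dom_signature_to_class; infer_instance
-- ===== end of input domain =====

-- B replaces A's scan of the 7 tier sets by a precomputed operator→tier index traversed over sig
-- (objective: alternative/idiomatic; no speed claim).

-- ===== PORT A =====
def pvTiersA : List (String × List String) :=
  [("core", ["Equal", "For", "And"]),
   ("arith", ["Add", "Sub", "Mul", "Div", "Pow", "Neg", "Sqrt"]),
   ("analytic", ["Sum", "Product", "Integral", "Limit", "Derivative", "ComplexDerivative"]),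
   ("combin", ["Factorial", "Binomial", "Floor", "Ceil"]),
   ("relational", ["Less", "LessEqual", "Greater", "GreaterEqual", "NotEqual"]),
   ("settheory", ["Set", "Element", "Exists", "ForAll", "Or", "Not", "Implies", "Equivalent"]),
   ("special", ["Zeros", "Poles", "Residues", "Solutions", "Image", "Convergents", "Def", "Where", "Abs"])]

def signature_to_class (sig : List String) : String :=
  let present := pvTiersA.foldl
    (fun acc p => if (PySem.Set.inter sig p.2).isEmpty then acc else acc ++ [p.1]) []
  if present.isEmpty then "empty" else PySem.Str.join "+" present

-- ===== PORT B =====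
def pvOpToTier : PySem.Dict String String := PySem.Dict.ofList
  [("Equal", "core"), ("For", "core"), ("And", "core"),
   ("Add", "arith"), ("Sub", "arith"), ("Mul", "arith"), ("Div", "arith"),
   ("Pow", "arith"), ("Neg", "arith"), ("Sqrt", "arith"),
   ("Sum", "analytic"), ("Product", "analytic"), ("Integral", "analytic"),
   ("Limit", "analytic"), ("Derivative", "analytic"), ("ComplexDerivative", "analytic"),
   ("Factorial", "combin"), ("Binomial", "combin"), ("Floor", "combin"), ("Ceil", "combin"),
   ("Less", "relational"), ("LessEqual", "relational"), ("Greater", "relational"),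
   ("GreaterEqual", "relational"), ("NotEqual", "relational"),
   ("Set", "settheory"), ("Element", "settheory"), ("Exists", "settheory"),
   ("ForAll", "settheory"), ("Or", "settheory"), ("Not", "settheory"),
   ("Implies", "settheory"), ("Equivalent", "settheory"),
   ("Zeros", "special"), ("Poles", "special"), ("Residues", "special"),
   ("Solutions", "special"), ("Image", "special"), ("Convergents", "special"),
   ("Def", "special"), ("Where", "special"), ("Abs", "special")]

def pvTierOrder : List String :=
  ["core", "arith", "analytic", "combin", "relational", "settheory", "special"]

def signature_to_class_alt (sig : List String) : String :=
  let presentTiers : PySem.Set String := sig.foldl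
    (fun s op => match PySem.Dict.get? pvOpToTier op with
      | some t => PySem.Set.add s t
      | none => s) PySem.Set.empty
  let present := pvTierOrder.filter (fun t => PySem.Set.contains presentTiers t)
  if present.isEmpty then "empty" else PySem.Str.join "+" present

-- ===== PRECONDITION & SPEC =====
def Spec_signature_to_class (sig : List String) (out : String) : Prop := out = signature_to_class_alt sig
instance (sig : List String) (out : String) : Decidable (Spec_signature_to_class sig out) := by unfold Spec_signature_to_class; infer_instance

-- ===== CLAIM (what is proved, stated in full; the proofs are below) =====
def Claim_equal_signature_to_class : Prop := ∀ (sig : List String), Dom_signature_to_class sig → Spec_signature_to_class sig (signature_to_class sig)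

-- ===== LEMMAS AND PROOFS =====

set_option maxRecDepth 4096 in
lemma pvItems : pvOpToTier.items =
  [("Equal", "core"), ("For", "core"), ("And", "core"),
   ("Add", "arith"), ("Sub", "arith"), ("Mul", "arith"), ("Div", "arith"),
   ("Pow", "arith"), ("Neg", "arith"), ("Sqrt", "arith"),
   ("Sum", "analytic"), ("Product", "analytic"), ("Integral", "analytic"),
   ("Limit", "analytic"), ("Derivative", "analytic"), ("ComplexDerivative", "analytic"),
   ("Factorial", "combin"), ("Binomial", "combin"), ("Floor", "combin"), ("Ceil", "combin"),
   ("Less", "relational"), ("LessEqual", "relational"), ("Greater", "relational"),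
   ("GreaterEqual", "relational"), ("NotEqual", "relational"),
   ("Set", "settheory"), ("Element", "settheory"), ("Exists", "settheory"),
   ("ForAll", "settheory"), ("Or", "settheory"), ("Not", "settheory"),
   ("Implies", "settheory"), ("Equivalent", "settheory"),
   ("Zeros", "special"), ("Poles", "special"), ("Residues", "special"),
   ("Solutions", "special"), ("Image", "special"), ("Convergents", "special"),
   ("Def", "special"), ("Where", "special"), ("Abs", "special")] := by rfl

lemma pvNodup : pvOpToTier.keys.Nodup := PySem.Dict.nodup_keys_ofList _

-- The inverted index maps an operator to the tier name t exactly when the tier-t set contains it.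
lemma pvHL (name : String) (L : List String)
    (h : ∀ op, ((op, name) ∈ pvOpToTier.items) ↔ op ∈ L) :
    ∀ op, PySem.Dict.get? pvOpToTier op = some name ↔ op ∈ L := fun op =>
  (PySem.Dict.get?_eq_some_iff_mem_items pvOpToTier op name pvNodup).trans (h op)

-- Membership in B's fold-built set of present tiers.
lemma pvMem_fold (sig : List String) (s0 : PySem.Set String) (y : String) :
    y ∈ sig.foldl
      (fun s op => match PySem.Dict.get? pvOpToTier op with
        | some t => PySem.Set.add s t
        | none => s) s0
    ↔ y ∈ s0 ∨ ∃ op ∈ sig, PySem.Dict.get? pvOpToTier op = some y := by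
  induction sig generalizing s0 with
  | nil => simp
  | cons a l ih =>
    simp only [List.foldl_cons]
    cases h : PySem.Dict.get? pvOpToTier a with
    | none => simp [h, ih]
    | some t =>
      simp only [ih, PySem.Set.mem_add, List.mem_cons]
      constructor
      · rintro ((hy | rfl) | ⟨op, hop, hlk⟩)
        · exact .inl hy
        · exact .inr ⟨a, .inl rfl, h⟩
        · exact .inr ⟨op, .inr hop, hlk⟩
      · rintro (hy | ⟨op, (rfl | hop), hlk⟩)
        · exact .inl (.inl hy)
        · exact .inl (.inr (by rw [h] at hlk; exact (Option.some_inj.mp hlk).symm))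
        · exact .inr ⟨op, hop, hlk⟩

-- B's per-tier presence test equals A's nonempty-intersection test.
lemma pvCond_eq (sig : List String) (name : String) (L : List String)
    (hL : ∀ op, PySem.Dict.get? pvOpToTier op = some name ↔ op ∈ L) :
    PySem.Set.contains
      (sig.foldl
        (fun s op => match PySem.Dict.get? pvOpToTier op with
          | some t => PySem.Set.add s t
          | none => s) PySem.Set.empty) name
    = !(PySem.Set.inter sig L).isEmpty := by
  rcases h : (PySem.Set.inter sig L).isEmpty with _ | _
  · have hne : PySem.Set.inter sig L ≠ [] := by simp_all
    rcases List.exists_mem_of_ne_nil _ hne with ⟨x, hx⟩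
    rw [PySem.Set.mem_inter] at hx
    simp only [Bool.not_false]
    rw [PySem.Set.contains_iff, pvMem_fold]
    exact .inr ⟨x, hx.1, (hL x).mpr hx.2⟩
  · rw [List.isEmpty_iff] at h
    simp only [Bool.not_true]
    rw [Bool.eq_false_iff, Ne, PySem.Set.contains_iff, pvMem_fold]
    rintro (hy | ⟨op, hop, hlk⟩)
    · simp [PySem.Set.empty] at hy
    · have : op ∈ PySem.Set.inter sig L := (PySem.Set.mem_inter _ _ _).mpr ⟨hop, (hL op).mp hlk⟩
      simp [h] at this

-- ===== VERDICT (by name: the statement is the Claim_ definition above) =====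
set_option maxHeartbeats 2000000 in
theorem signature_to_class_spec : Claim_equal_signature_to_class := by
  intro sig _
  unfold Spec_signature_to_class
  show signature_to_class sig = signature_to_class_alt sig
  simp only [signature_to_class, signature_to_class_alt, pvTiersA, pvTierOrder,
    List.foldl_cons, List.foldl_nil, List.filter_cons, List.filter_nil]
  rw [pvCond_eq sig "core" ["Equal", "For", "And"]
        (pvHL _ _ (by intro op; rw [pvItems]; simp [Prod.ext_iff, eq_comm])),
      pvCond_eq sig "arith" ["Add", "Sub", "Mul", "Div", "Pow", "Neg", "Sqrt"]
        (pvHL _ _ (by intro op; rw [pvItems]; simp [Prod.ext_iff, eq_comm])),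
      pvCond_eq sig "analytic" ["Sum", "Product", "Integral", "Limit", "Derivative", "ComplexDerivative"]
        (pvHL _ _ (by intro op; rw [pvItems]; simp [Prod.ext_iff])),
      pvCond_eq sig "combin" ["Factorial", "Binomial", "Floor", "Ceil"]
        (pvHL _ _ (by intro op; rw [pvItems]; simp [Prod.ext_iff, eq_comm])),
      pvCond_eq sig "relational" ["Less", "LessEqual", "Greater", "GreaterEqual", "NotEqual"]
        (pvHL _ _ (by intro op; rw [pvItems]; simp [Prod.ext_iff, eq_comm])),
      pvCond_eq sig "settheory" ["Set", "Element", "Exists", "ForAll", "Or", "Not", "Implies", "Equivalent"]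
        (pvHL _ _ (by intro op; rw [pvItems]; simp [Prod.ext_iff, eq_comm])),
      pvCond_eq sig "special" ["Zeros", "Poles", "Residues", "Solutions", "Image", "Convergents", "Def", "Where", "Abs"]
        (pvHL _ _ (by intro op; rw [pvItems]; simp [Prod.ext_iff, eq_comm]))]
  generalize (PySem.Set.inter sig ["Equal", "For", "And"]).isEmpty = b1
  generalize (PySem.Set.inter sig ["Add", "Sub", "Mul", "Div", "Pow", "Neg", "Sqrt"]).isEmpty = b2
  generalize (PySem.Set.inter sig ["Sum", "Product", "Integral", "Limit", "Derivative", "ComplexDerivative"]).isEmpty = b3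
  generalize (PySem.Set.inter sig ["Factorial", "Binomial", "Floor", "Ceil"]).isEmpty = b4
  generalize (PySem.Set.inter sig ["Less", "LessEqual", "Greater", "GreaterEqual", "NotEqual"]).isEmpty = b5
  generalize (PySem.Set.inter sig ["Set", "Element", "Exists", "ForAll", "Or", "Not", "Implies", "Equivalent"]).isEmpty = b6
  generalize (PySem.Set.inter sig ["Zeros", "Poles", "Residues", "Solutions", "Image", "Convergents", "Def", "Where", "Abs"]).isEmpty = b7
  cases b1 <;> cases b2 <;> cases b3 <;> cases b4 <;> cases b5 <;> cases b6 <;> cases b7 <;> rfl
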